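-- pv_equiv track=rewrite | github.com/stxupengyu/OTTA | l3r_confidence.py | _build_token_positions
-- ===== SOURCE A (Python) =====
-- from typing import Callable, Dict, List, Optional, Sequence, Tuple
--
-- def _build_token_positions(token_logprobs: Sequence[Dict]) -> List[Tuple[int, int, int, str]]:
--     positions: List[Tuple[int, int, int, str]] = []
--     accumulated_pos = 0
--     for idx, step in enumerate(token_logprobs):
--         token = step.get("token")
--         if token is None:
--             continue
--         start = accumulated_pos
--         end = accumulated_pos + len(token)
--         positions.append((idx, start, end, token))
--         accumulated_pos = end
--     return positions
-- ===== SOURCE B (Python) =====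
-- def _build_token_positions(token_logprobs):
--     entries = [(idx, step.get("token")) for idx, step in enumerate(token_logprobs)
--                if step.get("token") is not None]
--     starts = []
--     total = 0
--     for _, tok in entries:
--         starts.append(total)
--         total += len(tok)
--     return [(idx, s, s + len(tok), tok)
--             for (idx, tok), s in zip(entries, starts)]
-- ===== Notes on version B (the rewrite author's own statement) =====
-- stated objective: alternative
-- what changed: Replaces A's single pass that threads a running offset through the result-building loop with three separate passes: filter the surviving (index, token) entries, build a prefix-sum table of start offsets, then zip entries with starts to assemble the tuples.
import Mathlib
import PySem

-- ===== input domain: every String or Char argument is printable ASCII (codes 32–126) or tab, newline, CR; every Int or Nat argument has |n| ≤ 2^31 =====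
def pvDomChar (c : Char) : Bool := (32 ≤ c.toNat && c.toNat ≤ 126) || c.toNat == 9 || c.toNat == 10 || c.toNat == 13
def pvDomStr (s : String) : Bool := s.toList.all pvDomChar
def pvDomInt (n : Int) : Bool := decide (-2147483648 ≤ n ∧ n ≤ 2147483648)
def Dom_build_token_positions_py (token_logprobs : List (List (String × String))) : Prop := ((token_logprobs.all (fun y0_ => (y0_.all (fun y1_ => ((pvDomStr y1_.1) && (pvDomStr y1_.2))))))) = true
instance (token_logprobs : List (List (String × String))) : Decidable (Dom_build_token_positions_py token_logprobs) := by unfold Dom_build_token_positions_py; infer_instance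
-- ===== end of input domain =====

-- B rebuilds the result from a filtered entry list plus a separate prefix-sum table of start
-- offsets instead of threading a running offset through the result-building loop (alternative
-- decomposition, same cost).

-- ===== PORT A =====
-- step.get("token"): dict as association list, first match (type convention)
def build_token_positions_py (token_logprobs : List (List (String × String))) : List (Int × Int × Int × String) :=
  ((PySem.List.enumerate token_logprobs 0).foldl
    (fun (st : List (Int × Int × Int × String) × Int) p =>
      match (p.2.find? (fun kv => kv.1 == "token")).map (·.2) with
      | none => st
      | some tok => (st.1 ++ [(p.1, st.2, st.2 + PySem.Str.len tok, tok)], st.2 + PySem.Str.len tok))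
    ([], 0)).1

-- ===== PORT B =====
def build_token_positions_py_alt (token_logprobs : List (List (String × String))) : List (Int × Int × Int × String) :=
  let entries := (PySem.List.enumerate token_logprobs 0).filterMap
    (fun p => (p.2.find? (fun kv => kv.1 == "token")).map (fun kv => (p.1, kv.2)))
  let starts := (entries.foldl
    (fun (st : List Int × Int) e => (st.1 ++ [st.2], st.2 + PySem.Str.len e.2)) ([], 0)).1
  (entries.zip starts).map (fun q => (q.1.1, q.2, q.2 + PySem.Str.len q.1.2, q.1.2))

-- ===== PRECONDITION & SPEC =====
def Spec_build_token_positions_py (token_logprobs : List (List (String × String))) (out : List (Int × Int × Int × String)) : Prop := out = build_token_positions_py_alt token_logprobs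
instance (token_logprobs : List (List (String × String))) (out : List (Int × Int × Int × String)) : Decidable (Spec_build_token_positions_py token_logprobs out) := by unfold Spec_build_token_positions_py; infer_instance

-- ===== CLAIM (what is proved, stated in full; the proofs are below) =====
def Claim_equal_build_token_positions_py : Prop := ∀ (token_logprobs : List (List (String × String))), Dom_build_token_positions_py token_logprobs → Spec_build_token_positions_py token_logprobs (build_token_positions_py token_logprobs)

-- ===== LEMMAS AND PROOFS =====

-- reference assembly of entries from a base offset (lengths in the simp-normal form ↑t.length)
def pvAsm : List (Int × String) → Int → List (Int × Int × Int × String)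
  | [], _ => []
  | (i, t) :: r, pos => (i, pos, pos + (t.length : Int), t) :: pvAsm r (pos + (t.length : Int))

-- reference start-offset table
def pvStarts : List (Int × String) → Int → List Int
  | [], _ => []
  | (_, t) :: r, pos => pos :: pvStarts r (pos + (t.length : Int))

theorem pvFoldA_eq (l : List (Int × List (String × String)))
    (acc : List (Int × Int × Int × String)) (pos : Int) :
    (l.foldl
      (fun (st : List (Int × Int × Int × String) × Int) p =>
        match (p.2.find? (fun kv => kv.1 == "token")).map (·.2) with
        | none => st
        | some tok => (st.1 ++ [(p.1, st.2, st.2 + (tok.length : Int), tok)], st.2 + (tok.length : Int)))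
      (acc, pos)).1
    = acc ++ pvAsm (l.filterMap
        (fun p => (p.2.find? (fun kv => kv.1 == "token")).map (fun kv => (p.1, kv.2)))) pos := by
  induction l generalizing acc pos with
  | nil => simp [pvAsm]
  | cons p r ih =>
    cases h : p.2.find? (fun kv => kv.1 == "token") with
    | none => simp [List.foldl, List.filterMap, h, ih]
    | some kv =>
      simp only [List.foldl_cons, h, Option.map_some, List.filterMap_cons, pvAsm]
      rw [ih]
      simp

theorem pvFoldS_eq (e : List (Int × String)) (acc : List Int) (pos : Int) :
    (e.foldl
      (fun (st : List Int × Int) x => (st.1 ++ [st.2], st.2 + (x.2.length : Int))) (acc, pos)).1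
    = acc ++ pvStarts e pos := by
  induction e generalizing acc pos with
  | nil => simp [pvStarts]
  | cons x r ih =>
    simp only [List.foldl_cons]
    rw [ih]
    simp [pvStarts]

theorem pvZip_eq (e : List (Int × String)) (pos : Int) :
    (e.zip (pvStarts e pos)).map
      (fun q => (q.1.1, q.2, q.2 + (q.1.2.length : Int), q.1.2)) = pvAsm e pos := by
  induction e generalizing pos with
  | nil => simp [pvStarts, pvAsm]
  | cons x r ih => simp [pvStarts, pvAsm]; exact ih _

-- ===== VERDICT (by name: the statement is the Claim_ definition above) =====
theorem build_token_positions_py_spec : Claim_equal_build_token_positions_py := by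
  intro tl _
  unfold Spec_build_token_positions_py
  simp [build_token_positions_py, build_token_positions_py_alt, pvFoldA_eq, pvFoldS_eq, pvZip_eq]
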